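-- pv_equiv track=rewrite | github.com/pingjuu/BLOOMFUZZ | modules/PktCapture.py | Reconstruct_StateM2
-- ===== SOURCE A (Python) =====
-- from collections import OrderedDict, defaultdict
--
-- def classifyStateM(stateMs):
--     cluster_stateMs = {
--         "Wait Connect":[],
--         "Wait Connect Rsp":[],
--         "Wait Send Config":[],
--         "Wait Config Req Rsp":[],
--         "Wait Create":[],
--         "Wait Create Rsp":[],
--         "Wait Move": [],
--         "Wait Move Rsp":[],
--         "Wait Disconnect":[]
--     }
--     for cluster_num in stateMs.keys():
--         if cluster_num in [0x02, 0x03]: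
--             cluster_stateMs["Wait Connect"].extend(stateMs[cluster_num])
--         elif cluster_num == 0x04:
--             cluster_stateMs["Wait Send Config"].extend(stateMs[cluster_num])
--         elif cluster_num == 0x05:
--             cluster_stateMs["Wait Config Req Rsp"].extend(stateMs[cluster_num])
--         elif cluster_num in [0x0C, 0x0D]:
--             cluster_stateMs["Wait Create"].extend(stateMs[cluster_num])
--         elif cluster_num in [0x0E, 0x0F]:
--             cluster_stateMs["Wait Move"].extend(stateMs[cluster_num])
--         elif cluster_num in [0x06, 0x07]:
--             cluster_stateMs["Wait Disconnect"].extend(stateMs[cluster_num])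
--     return cluster_stateMs
--
-- def Reconstruct_StateM2(captured_pkt):
--     # 단일 cluster도 적용해야한다.
--     cmd_code2cluster = {
--         0x2: 0,
--         0x3: 0,
--         0x4: 1,
--         0x5: 1,
--         0x6: 2,
--         0x7: 2,
--         0xC: 3,
--         0xD: 3,
--         0xE: 4,
--         0xF: 4,
--         0x10: 4,
--         0x11: 4,
--     }
--
--     clusters = []
--     cluster = []
--     current_cluster = -1
--
--     for pkt_info in captured_pkt.items():
--         _, cmd_code = pkt_info
--
--         cluster_id = cmd_code2cluster.get(cmd_code, -1)
--
--         # 클러스터가 없는 cmd_code 인 경우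
--         if cluster_id == -1:
--             continue
--
--         # 최초 클러스터인 경우
--         if current_cluster == -1:
--             current_cluster = cluster_id
--             cluster.append(cmd_code)
--
--         # 최초 클러스터가 아닌 경우
--         else:
--             # 이전 클러스터와 같은 경우
--             if current_cluster == cluster_id:
--                 cluster.append(cmd_code)
--
--             # 이전 클러스터와 다른 경우
--             else:
--                 clusters.append(tuple(cluster))
--                 current_cluster = cluster_id
--                 cluster = [cmd_code]
--
--     if cluster != []:
--         clusters.append(tuple(cluster))
--     clusters = list(set(clusters))
--
--     StateMs = defaultdict(list)
--     for cluster in clusters: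
--         StateMs[cluster[0]].append(cluster)
--     classifiedStateMs = classifyStateM(StateMs)
--     return classifiedStateMs
-- ===== SOURCE B (Python) =====
-- def Reconstruct_StateM2(captured_pkt):
--     cid = {0x2: 0, 0x3: 0, 0x4: 1, 0x5: 1, 0x6: 2, 0x7: 2,
--            0xC: 3, 0xD: 3, 0xE: 4, 0xF: 4, 0x10: 4, 0x11: 4}
--     name_of = {0x2: "Wait Connect", 0x3: "Wait Connect", 0x4: "Wait Send Config",
--                0x5: "Wait Config Req Rsp", 0x6: "Wait Disconnect", 0x7: "Wait Disconnect",
--                0xC: "Wait Create", 0xD: "Wait Create", 0xE: "Wait Move", 0xF: "Wait Move"}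
--     names = ["Wait Connect", "Wait Connect Rsp", "Wait Send Config", "Wait Config Req Rsp",
--              "Wait Create", "Wait Create Rsp", "Wait Move", "Wait Move Rsp", "Wait Disconnect"]
--
--     codes = [c for c in captured_pkt.values() if c in cid]
--
--     # recursive peeling of the first maximal same-cluster run
--     def runs(xs):
--         if not xs:
--             return []
--         n = 1
--         while n < len(xs) and cid[xs[n]] == cid[xs[0]]:
--             n += 1
--         return [tuple(xs[:n])] + runs(xs[n:])
--
--     # first-occurrence dedup
--     def dedup(rs):
--         seen = []
--         for r in rs:
--             if r not in seen:
--                 seen.append(r)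
--         return seen
--
--     rs = runs(codes)
--     return {nm: dedup([r for r in rs if name_of.get(r[0]) == nm]) for nm in names}
-- ===== Notes on version B (the rewrite author's own statement) =====
-- stated objective: alternative
-- what changed: B replaces A's single-pass running-cluster state machine + global set dedup + defaultdict-then-classifyStateM distribution by a recursive splitter that peels off the first maximal same-cluster run, followed by nine per-category passes, each filtering the run list by its category name and deduping it in first-occurrence order (equal to A's set order under Pre_, where each category holds at most one distinct run).
import Mathlib
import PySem

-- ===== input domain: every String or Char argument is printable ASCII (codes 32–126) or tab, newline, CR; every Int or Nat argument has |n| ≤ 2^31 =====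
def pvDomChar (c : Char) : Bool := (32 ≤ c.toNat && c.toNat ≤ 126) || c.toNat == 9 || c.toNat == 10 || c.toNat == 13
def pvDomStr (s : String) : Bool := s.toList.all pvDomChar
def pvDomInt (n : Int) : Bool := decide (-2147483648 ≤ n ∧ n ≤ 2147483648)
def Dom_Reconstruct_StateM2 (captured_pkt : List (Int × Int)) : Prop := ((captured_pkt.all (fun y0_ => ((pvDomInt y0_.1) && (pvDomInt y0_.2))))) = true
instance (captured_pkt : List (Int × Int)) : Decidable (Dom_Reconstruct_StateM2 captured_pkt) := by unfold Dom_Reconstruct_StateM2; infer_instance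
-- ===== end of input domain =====

-- B replaces A's running-cluster state machine + global set dedup + defaultdict distribution by a
-- recursive first-run-peeling splitter and nine per-category filter-and-dedup passes (objective:
-- alternative; equivalence is proved on Pre_, where no output list depends on set-iteration order).

-- ===== PORT A =====
def classifyStateM (stateMs : PySem.Dict Int (List (List Int))) : PySem.Dict String (List (List Int)) :=
  let cluster_stateMs : PySem.Dict String (List (List Int)) := PySem.Dict.ofList
    [("Wait Connect", []), ("Wait Connect Rsp", []), ("Wait Send Config", []), ("Wait Config Req Rsp", []),
     ("Wait Create", []), ("Wait Create Rsp", []), ("Wait Move", []), ("Wait Move Rsp", []), ("Wait Disconnect", [])]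
  stateMs.keys.foldl (fun d cluster_num =>
    if cluster_num ∈ ([0x02, 0x03] : List Int) then d.modify "Wait Connect" [] (· ++ stateMs.getD cluster_num [])
    else if cluster_num = 0x04 then d.modify "Wait Send Config" [] (· ++ stateMs.getD cluster_num [])
    else if cluster_num = 0x05 then d.modify "Wait Config Req Rsp" [] (· ++ stateMs.getD cluster_num [])
    else if cluster_num ∈ ([0x0C, 0x0D] : List Int) then d.modify "Wait Create" [] (· ++ stateMs.getD cluster_num [])
    else if cluster_num ∈ ([0x0E, 0x0F] : List Int) then d.modify "Wait Move" [] (· ++ stateMs.getD cluster_num [])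
    else if cluster_num ∈ ([0x06, 0x07] : List Int) then d.modify "Wait Disconnect" [] (· ++ stateMs.getD cluster_num [])
    else d) cluster_stateMs

def Reconstruct_StateM2 (captured_pkt : List (Int × Int)) : List (String × List (List Int)) :=
  let cmd_code2cluster : PySem.Dict Int Int := PySem.Dict.ofList
    [(0x2, 0), (0x3, 0), (0x4, 1), (0x5, 1), (0x6, 2), (0x7, 2), (0xC, 3), (0xD, 3), (0xE, 4), (0xF, 4), (0x10, 4), (0x11, 4)]
  let st := (PySem.Dict.ofList captured_pkt).items.foldl
    (fun (s : List (List Int) × List Int × Int) pkt_info =>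
      let cmd_code := pkt_info.2
      let cluster_id := cmd_code2cluster.getD cmd_code (-1)
      if cluster_id = -1 then s
      else if s.2.2 = -1 then (s.1, s.2.1 ++ [cmd_code], cluster_id)
      else if s.2.2 = cluster_id then (s.1, s.2.1 ++ [cmd_code], s.2.2)
      else (s.1 ++ [s.2.1], [cmd_code], cluster_id))
    ([], [], -1)
  let clusters := if st.2.1 ≠ [] then st.1 ++ [st.2.1] else st.1
  let clusters' := PySem.Set.ofList clusters
  let StateMs : PySem.Dict Int (List (List Int)) :=
    clusters'.foldl (fun d cluster => d.modify cluster.headI [] (· ++ [cluster])) PySem.Dict.empty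
  (classifyStateM StateMs).items

-- ===== PORT B =====
-- Source B's `runs`: the while loop counts the longest prefix of xs[1:] with cid equal to cid[xs[0]]
-- and the two slices xs[:n]/xs[n:] are exactly that takeWhile/dropWhile split; `cid[x]` is rendered
-- by the total option comparison `get? x == get? c` (exact here: every x in the filtered list is a key).
def pvRunsB : List Int → List (List Int)
  | [] => []
  | c :: rest =>
    let cid : PySem.Dict Int Int := PySem.Dict.ofList
      [(0x2, 0), (0x3, 0), (0x4, 1), (0x5, 1), (0x6, 2), (0x7, 2), (0xC, 3), (0xD, 3), (0xE, 4), (0xF, 4), (0x10, 4), (0x11, 4)]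
    (c :: rest.takeWhile (fun x => cid.get? x == cid.get? c))
      :: pvRunsB (rest.dropWhile (fun x => cid.get? x == cid.get? c))
  termination_by xs => xs.length
  decreasing_by simpa using Nat.lt_succ_of_le (List.length_dropWhile_le _ _)

def Reconstruct_StateM2_alt (captured_pkt : List (Int × Int)) : List (String × List (List Int)) :=
  let cid : PySem.Dict Int Int := PySem.Dict.ofList
    [(0x2, 0), (0x3, 0), (0x4, 1), (0x5, 1), (0x6, 2), (0x7, 2), (0xC, 3), (0xD, 3), (0xE, 4), (0xF, 4), (0x10, 4), (0x11, 4)]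
  let name_of : PySem.Dict Int String := PySem.Dict.ofList
    [(0x2, "Wait Connect"), (0x3, "Wait Connect"), (0x4, "Wait Send Config"), (0x5, "Wait Config Req Rsp"),
     (0x6, "Wait Disconnect"), (0x7, "Wait Disconnect"), (0xC, "Wait Create"), (0xD, "Wait Create"),
     (0xE, "Wait Move"), (0xF, "Wait Move")]
  let names : List String := ["Wait Connect", "Wait Connect Rsp", "Wait Send Config", "Wait Config Req Rsp",
    "Wait Create", "Wait Create Rsp", "Wait Move", "Wait Move Rsp", "Wait Disconnect"]
  let codes := (PySem.Dict.ofList captured_pkt).values.filter (fun c => cid.contains c)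
  let rs := pvRunsB codes
  -- Source B's hand-written first-occurrence dedup, verbatim as a fold; r[0] is headI (runs are nonempty)
  names.map (fun nm =>
    (nm, ((rs.filter (fun r => name_of.get? r.headI == some nm)).foldl
      (fun seen r => if seen.contains r then seen else seen ++ [r]) [])))

-- ===== PRECONDITION & SPEC =====
def pvCid (c : Int) : Int :=
  if c = 2 ∨ c = 3 then 0 else if c = 4 ∨ c = 5 then 1 else if c = 6 ∨ c = 7 then 2
  else if c = 12 ∨ c = 13 then 3 else if c = 14 ∨ c = 15 ∨ c = 16 ∨ c = 17 then 4 else -1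

def pvCat (c : Int) : Option String :=
  if c = 2 ∨ c = 3 then some "Wait Connect" else if c = 4 then some "Wait Send Config"
  else if c = 5 then some "Wait Config Req Rsp" else if c = 12 ∨ c = 13 then some "Wait Create"
  else if c = 14 ∨ c = 15 then some "Wait Move" else if c = 6 ∨ c = 7 then some "Wait Disconnect" else none

def pvRuns : List Int → List (List Int)
  | [] => []
  | c :: rest =>
    match rest, pvRuns rest with
    | c2 :: _, g :: gs => if pvCid c == pvCid c2 then (c :: g) :: gs else [c] :: g :: gs
    | _, _ => [[c]]

-- Pre_ excludes inputs on which two distinct maximal runs fall into the same output category: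
-- there A's per-category list order comes from Python's set-iteration (hash) order, which is
-- accidental and not modelled; within Pre_ every category holds at most one run, so the output
-- does not depend on that order.
def Pre_Reconstruct_StateM2 (captured_pkt : List (Int × Int)) : Prop :=
  ((PySem.Set.ofList (pvRuns (((PySem.Dict.ofList captured_pkt).values.filter (fun c => pvCid c != -1))))).filterMap
    (fun r => pvCat r.headI)).Nodup
instance (captured_pkt : List (Int × Int)) : Decidable (Pre_Reconstruct_StateM2 captured_pkt) := by
  unfold Pre_Reconstruct_StateM2; infer_instance

def pvWitness_Reconstruct_StateM2 : (List (Int × Int)) := [(0, 2), (1, 12)]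

def Spec_Reconstruct_StateM2 (captured_pkt : List (Int × Int)) (out : List (String × List (List Int))) : Prop := out = Reconstruct_StateM2_alt captured_pkt
instance (captured_pkt : List (Int × Int)) (out : List (String × List (List Int))) : Decidable (Spec_Reconstruct_StateM2 captured_pkt out) := by unfold Spec_Reconstruct_StateM2; infer_instance

-- ===== CLAIM (what is proved, stated in full; the proofs are below) =====
def Claim_equal_Reconstruct_StateM2 : Prop := ∀ (captured_pkt : List (Int × Int)), Dom_Reconstruct_StateM2 captured_pkt → Pre_Reconstruct_StateM2 captured_pkt → Spec_Reconstruct_StateM2 captured_pkt (Reconstruct_StateM2 captured_pkt)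

-- ===== LEMMAS AND PROOFS =====
def pvStep (s : List (List Int) × List Int × Int) (c : Int) : List (List Int) × List Int × Int :=
  if s.2.2 = -1 then (s.1, s.2.1 ++ [c], pvCid c)
  else if s.2.2 = pvCid c then (s.1, s.2.1 ++ [c], s.2.2)
  else (s.1 ++ [s.2.1], [c], pvCid c)

def pvFlush (s : List (List Int) × List Int × Int) : List (List Int) :=
  if s.2.1 ≠ [] then s.1 ++ [s.2.1] else s.1

lemma pvRuns_cons_eq (c : Int) (rest : List Int) :
    pvRuns (c :: rest)
    = (c :: rest.takeWhile (fun x => pvCid x == pvCid c)) :: pvRuns (rest.dropWhile (fun x => pvCid x == pvCid c)) := by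
  induction rest generalizing c with
  | nil => simp [pvRuns]
  | cons c2 rs ih =>
    cases hg : pvRuns (c2 :: rs) with
    | nil => rw [ih c2] at hg; cases hg
    | cons g gs =>
      have hu : pvRuns (c :: c2 :: rs) = if pvCid c == pvCid c2 then (c :: g) :: gs else [c] :: g :: gs := by
        rw [pvRuns.eq_def]
        simp only [hg]
      rw [hu]
      by_cases h : pvCid c = pvCid c2
      · rw [ih c2] at hg
        injection hg with hg1 hg2
        rw [List.takeWhile_cons, List.dropWhile_cons]
        simp [h, ← hg1, ← hg2]
      · have h' : pvCid c2 ≠ pvCid c := fun hh => h hh.symm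
        rw [List.takeWhile_cons, List.dropWhile_cons]
        simp only [beq_iff_eq, if_neg h, if_neg h']
        rw [← hg]

lemma loop_inv (m : List Int) (acc : List (List Int)) (cur : List Int) (cc : Int)
    (hm : ∀ c ∈ m, pvCid c ≠ -1) (hcur : cur ≠ []) (hcc : cc ≠ -1) :
    pvFlush (m.foldl pvStep (acc, cur, cc))
    = acc ++ ((cur ++ m.takeWhile (fun x => pvCid x == cc)) :: pvRuns (m.dropWhile (fun x => pvCid x == cc))) := by
  induction m generalizing acc cur cc with
  | nil => simp [pvFlush, pvRuns, hcur]
  | cons c ms ih =>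
    have hm' : ∀ x ∈ ms, pvCid x ≠ -1 := fun x hx => hm x (List.mem_cons_of_mem _ hx)
    have hc : pvCid c ≠ -1 := hm c List.mem_cons_self
    by_cases h : cc = pvCid c
    · have hstep : pvStep (acc, cur, cc) c = (acc, cur ++ [c], cc) := by
        simp [pvStep, h]
      have htw : (c :: ms).takeWhile (fun x => pvCid x == cc) = c :: ms.takeWhile (fun x => pvCid x == cc) := by
        simp [h]
      have hdw : (c :: ms).dropWhile (fun x => pvCid x == cc) = ms.dropWhile (fun x => pvCid x == cc) := by
        simp [h]
      rw [List.foldl_cons, hstep, ih acc (cur ++ [c]) cc hm' (by simp) hcc, htw, hdw]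
      simp
    · have hstep : pvStep (acc, cur, cc) c = (acc ++ [cur], [c], pvCid c) := by
        simp [pvStep, hcc, h]
      have htw : (c :: ms).takeWhile (fun x => pvCid x == cc) = [] := by
        simp [List.takeWhile_cons]; omega
      have hdw : (c :: ms).dropWhile (fun x => pvCid x == cc) = c :: ms := by
        simp [List.dropWhile_cons]; omega
      rw [List.foldl_cons, hstep, ih (acc ++ [cur]) [c] (pvCid c) hm' (by simp) hc, htw, hdw]
      rw [pvRuns_cons_eq]
      simp

lemma loop_main (m : List Int) (hm : ∀ c ∈ m, pvCid c ≠ -1) :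
    pvFlush (m.foldl pvStep ([], [], -1)) = pvRuns m := by
  cases m with
  | nil => simp [pvFlush, pvRuns]
  | cons c ms =>
    have hstep : pvStep ([], [], -1) c = ([], [c], pvCid c) := by simp [pvStep]
    rw [List.foldl_cons, hstep,
      loop_inv ms [] [c] (pvCid c) (fun x hx => hm x (List.mem_cons_of_mem _ hx)) (by simp)
        (hm c List.mem_cons_self), pvRuns_cons_eq]
    simp

lemma getD_fold_app {α : Type} (l : List α) (key : α → Option String) (val : α → List (List Int))
    (d : PySem.Dict String (List (List Int))) (nm : String) :
    (l.foldl (fun d x => match key x with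
      | some k => d.modify k [] (· ++ val x)
      | none => d) d).getD nm []
    = d.getD nm [] ++ (l.filter (fun x => key x == some nm)).flatMap val := by
  induction l generalizing d with
  | nil => simp
  | cons x xs ih =>
    rw [List.foldl_cons, List.filter_cons]
    cases hx : key x with
    | none => rw [ih]; simp
    | some k =>
      by_cases hk : k = nm
      · subst hk
        rw [ih]
        simp [PySem.Dict.getD_modify_self]
      · rw [ih]
        rw [PySem.Dict.getD_modify_of_ne]
        · simp [hk]
        · exact fun h => hk h.symm

lemma keys_fold_app {α : Type} (l : List α) (key : α → Option String) (val : α → List (List Int))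
    (d : PySem.Dict String (List (List Int)))
    (h : ∀ x ∈ l, ∀ nm, key x = some nm → d.contains nm = true) :
    (l.foldl (fun d x => match key x with
      | some k => d.modify k [] (· ++ val x)
      | none => d) d).keys = d.keys := by
  induction l generalizing d with
  | nil => rfl
  | cons x xs ih =>
    rw [List.foldl_cons]
    cases hx : key x with
    | none =>
      exact ih d (fun y hy => h y (List.mem_cons_of_mem _ hy))
    | some k =>
      have hck : d.contains k = true := h x List.mem_cons_self k hx
      have hkeys : (d.modify k [] (· ++ val x)).keys = d.keys := by
        rw [PySem.Dict.keys_modify, PySem.Dict.keys_insert_of_contains]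
        exact hck
      rw [ih _ ?_, hkeys]
      intro y hy nm hnm
      rw [PySem.Dict.contains_modify]
      simp [h y (List.mem_cons_of_mem _ hy) nm hnm]

lemma stateMs_getD (S : List (List Int)) (k : Int) :
    (S.foldl (fun d cluster => d.modify cluster.headI [] (· ++ [cluster])) PySem.Dict.empty).getD k []
    = S.filter (fun r => r.headI == k) := by
  have h1 : (S.foldl (fun d cluster => d.modify cluster.headI [] (· ++ [cluster])) PySem.Dict.empty)
      = (S.map (fun r => (r.headI, r))).foldl (fun d p => d.modify p.1 [] (· ++ [p.2])) PySem.Dict.empty := by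
    rw [List.foldl_map]
  rw [h1, PySem.Dict.getD_foldl_modify_append, List.filter_map]
  simp [Function.comp_def]

lemma stateMs_keys (S : List (List Int)) :
    (S.foldl (fun d cluster => d.modify cluster.headI [] (· ++ [cluster])) PySem.Dict.empty).keys
    = PySem.Set.ofList (S.map (fun r => r.headI)) := by
  rw [PySem.Dict.keys_foldl_modify_key S (fun r => r.headI) [] (fun _ r => (· ++ [r])),
    PySem.Dict.keys_empty, PySem.Set.ofList_eq_foldl]
  rfl

lemma nodup_singleton_of_mem_iff {α : Type} [DecidableEq α] (l : List α) (a : α)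
    (hn : l.Nodup) (h : ∀ x, x ∈ l ↔ x = a) : l = [a] := by
  cases l with
  | nil => exact absurd ((h a).mpr rfl) (by simp)
  | cons x xs =>
    have hx : x = a := (h x).mp List.mem_cons_self
    subst hx
    have : xs = [] := by
      apply List.eq_nil_iff_forall_not_mem.mpr
      intro y hy
      have := (h y).mp (List.mem_cons_of_mem _ hy)
      subst this
      exact (List.nodup_cons.mp hn).1 hy
    simp [this]

lemma bucket_concat (S : List (List Int)) (nm : String)
    (hpre : (S.filterMap (fun r => pvCat r.headI)).count nm ≤ 1) :
    ((PySem.Set.ofList (S.map (fun r => r.headI))).filter (fun k => pvCat k == some nm)).flatMap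
      (fun k => S.filter (fun r => r.headI == k))
    = S.filter (fun r => pvCat r.headI == some nm) := by
  have hlen : (S.filter (fun r => pvCat r.headI == some nm)).length ≤ 1 := by
    rw [← List.countP_eq_length_filter, ← List.count_filterMap]
    exact hpre
  cases hFe : S.filter (fun r => pvCat r.headI == some nm) with
  | nil =>
    have hK : (PySem.Set.ofList (S.map (fun r => r.headI))).filter (fun k => pvCat k == some nm) = [] := by
      rw [List.filter_eq_nil_iff]
      intro k hk hcat
      obtain ⟨r, hr, rfl⟩ := List.mem_map.mp ((PySem.Set.mem_ofList _ _).mp hk)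
      have hmem : r ∈ S.filter (fun r => pvCat r.headI == some nm) := List.mem_filter.mpr ⟨hr, hcat⟩
      rw [hFe] at hmem
      exact absurd hmem (by simp)
    rw [hK]
    simp
  | cons r0 tl =>
    have htl : tl = [] := by
      rw [hFe] at hlen
      simp only [List.length_cons] at hlen
      exact List.eq_nil_of_length_eq_zero (by omega)
    have hr0 : r0 ∈ S ∧ (pvCat r0.headI == some nm) = true := by
      have : r0 ∈ S.filter (fun r => pvCat r.headI == some nm) := by
        rw [hFe]; exact List.mem_cons_self
      exact List.mem_filter.mp this
    have hKeq : (PySem.Set.ofList (S.map (fun r => r.headI))).filter (fun k => pvCat k == some nm)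
        = [r0.headI] := by
      apply nodup_singleton_of_mem_iff
      · exact (PySem.Set.nodup_ofList _).filter _
      · intro k
        constructor
        · intro hk
          obtain ⟨hkK, hkc⟩ := List.mem_filter.mp hk
          obtain ⟨r, hr, rfl⟩ := List.mem_map.mp ((PySem.Set.mem_ofList _ _).mp hkK)
          have hmem : r ∈ S.filter (fun r => pvCat r.headI == some nm) := List.mem_filter.mpr ⟨hr, hkc⟩
          rw [hFe, htl] at hmem
          simp only [List.mem_singleton] at hmem
          rw [hmem]
        · intro hk
          subst hk
          exact List.mem_filter.mpr ⟨(PySem.Set.mem_ofList _ _).mpr (List.mem_map_of_mem hr0.1), hr0.2⟩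
    rw [hKeq, htl]
    simp only [List.flatMap_cons, List.flatMap_nil, List.append_nil]
    have hcongr : ∀ r ∈ S, (r.headI == r0.headI) = ((r.headI == r0.headI) && (pvCat r.headI == some nm)) := by
      intro r _
      by_cases hh : r.headI = r0.headI
      · rw [hh, hr0.2]
        simp
      · simp [hh]
    calc S.filter (fun r => r.headI == r0.headI)
        = S.filter (fun r => (r.headI == r0.headI) && (pvCat r.headI == some nm)) := List.filter_congr hcongr
      _ = (S.filter (fun r => pvCat r.headI == some nm)).filter (fun r => r.headI == r0.headI) := List.filter_filter.symm
      _ = [r0] := by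
          rw [hFe, htl]
          simp

lemma tbl_eq : PySem.Dict.ofList [((0x2:Int), (0:Int)), (0x3, 0), (0x4, 1), (0x5, 1), (0x6, 2), (0x7, 2), (0xC, 3), (0xD, 3), (0xE, 4), (0xF, 4), (0x10, 4), (0x11, 4)]
  = PySem.Dict.mk [((0x2:Int), (0:Int)), (0x3, 0), (0x4, 1), (0x5, 1), (0x6, 2), (0x7, 2), (0xC, 3), (0xD, 3), (0xE, 4), (0xF, 4), (0x10, 4), (0x11, 4)] := by decide

lemma tblget (c : Int) : (PySem.Dict.ofList
    [((0x2:Int), (0:Int)), (0x3, 0), (0x4, 1), (0x5, 1), (0x6, 2), (0x7, 2), (0xC, 3), (0xD, 3), (0xE, 4), (0xF, 4), (0x10, 4), (0x11, 4)]).get? c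
    = if pvCid c = -1 then none else some (pvCid c) := by
  rcases em (c = 2) with h|h2; · subst h; decide
  rcases em (c = 3) with h|h3; · subst h; decide
  rcases em (c = 4) with h|h4; · subst h; decide
  rcases em (c = 5) with h|h5; · subst h; decide
  rcases em (c = 6) with h|h6; · subst h; decide
  rcases em (c = 7) with h|h7; · subst h; decide
  rcases em (c = 12) with h|h12; · subst h; decide
  rcases em (c = 13) with h|h13; · subst h; decide
  rcases em (c = 14) with h|h14; · subst h; decide
  rcases em (c = 15) with h|h15; · subst h; decide
  rcases em (c = 16) with h|h16; · subst h; decide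
  rcases em (c = 17) with h|h17; · subst h; decide
  have hid : pvCid c = -1 := by unfold pvCid; split_ifs <;> omega
  rw [tbl_eq, hid]
  simp only [PySem.Dict.get?_mk_cons, beq_iff_eq, if_neg (by omega : ¬(2:Int) = c),
    if_neg (by omega : ¬(3:Int) = c), if_neg (by omega : ¬(4:Int) = c), if_neg (by omega : ¬(5:Int) = c),
    if_neg (by omega : ¬(6:Int) = c), if_neg (by omega : ¬(7:Int) = c), if_neg (by omega : ¬(12:Int) = c),
    if_neg (by omega : ¬(13:Int) = c), if_neg (by omega : ¬(14:Int) = c), if_neg (by omega : ¬(15:Int) = c),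
    if_neg (by omega : ¬(16:Int) = c), if_neg (by omega : ¬(17:Int) = c)]
  rfl

lemma tblgetD1 (c : Int) : (PySem.Dict.ofList
    [((0x2:Int), (0:Int)), (0x3, 0), (0x4, 1), (0x5, 1), (0x6, 2), (0x7, 2), (0xC, 3), (0xD, 3), (0xE, 4), (0xF, 4), (0x10, 4), (0x11, 4)]).getD c (-1) = pvCid c := by
  rw [PySem.Dict.getD_eq_get?_getD, tblget]
  split_ifs with h
  · rw [h]; rfl
  · rfl

lemma tblcontains (c : Int) : (PySem.Dict.ofList
    [((0x2:Int), (0:Int)), (0x3, 0), (0x4, 1), (0x5, 1), (0x6, 2), (0x7, 2), (0xC, 3), (0xD, 3), (0xE, 4), (0xF, 4), (0x10, 4), (0x11, 4)]).contains c = (pvCid c != -1) := by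
  rw [PySem.Dict.contains_eq_isSome_get?, tblget]
  by_cases h : pvCid c = -1 <;> simp [h]

lemma namesget (c : Int) : (PySem.Dict.ofList
    [((0x2:Int), "Wait Connect"), (0x3, "Wait Connect"), (0x4, "Wait Send Config"), (0x5, "Wait Config Req Rsp"),
     (0x6, "Wait Disconnect"), (0x7, "Wait Disconnect"), (0xC, "Wait Create"), (0xD, "Wait Create"),
     (0xE, "Wait Move"), (0xF, "Wait Move")]).get? c = pvCat c := by
  rcases em (c = 2) with h|h2; · subst h; decide
  rcases em (c = 3) with h|h3; · subst h; decide
  rcases em (c = 4) with h|h4; · subst h; decide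
  rcases em (c = 5) with h|h5; · subst h; decide
  rcases em (c = 6) with h|h6; · subst h; decide
  rcases em (c = 7) with h|h7; · subst h; decide
  rcases em (c = 12) with h|h12; · subst h; decide
  rcases em (c = 13) with h|h13; · subst h; decide
  rcases em (c = 14) with h|h14; · subst h; decide
  rcases em (c = 15) with h|h15; · subst h; decide
  have hid : pvCat c = none := by unfold pvCat; split_ifs <;> first | omega | rfl
  have hmk : PySem.Dict.ofList
    [((0x2:Int), "Wait Connect"), (0x3, "Wait Connect"), (0x4, "Wait Send Config"), (0x5, "Wait Config Req Rsp"),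
     (0x6, "Wait Disconnect"), (0x7, "Wait Disconnect"), (0xC, "Wait Create"), (0xD, "Wait Create"),
     (0xE, "Wait Move"), (0xF, "Wait Move")] = PySem.Dict.mk
    [((0x2:Int), "Wait Connect"), (0x3, "Wait Connect"), (0x4, "Wait Send Config"), (0x5, "Wait Config Req Rsp"),
     (0x6, "Wait Disconnect"), (0x7, "Wait Disconnect"), (0xC, "Wait Create"), (0xD, "Wait Create"),
     (0xE, "Wait Move"), (0xF, "Wait Move")] := by decide
  rw [hmk, hid]
  simp only [PySem.Dict.get?_mk_cons, beq_iff_eq, if_neg (by omega : ¬(2:Int) = c),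
    if_neg (by omega : ¬(3:Int) = c), if_neg (by omega : ¬(4:Int) = c), if_neg (by omega : ¬(5:Int) = c),
    if_neg (by omega : ¬(6:Int) = c), if_neg (by omega : ¬(7:Int) = c), if_neg (by omega : ¬(12:Int) = c),
    if_neg (by omega : ¬(13:Int) = c), if_neg (by omega : ¬(14:Int) = c), if_neg (by omega : ¬(15:Int) = c)]
  rfl

lemma items_eq_keys_map (d : PySem.Dict String (List (List Int))) (h : d.keys.Nodup) :
    d.items = d.keys.map (fun k => (k, d.getD k [])) := by
  have h1 : d.keys.map (fun k => (k, d.getD k [])) = d.items.map (fun p => (p.1, d.getD p.1 [])) := by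
    simp only [PySem.Dict.keys, List.map_map, Function.comp_def]
  rw [h1]
  have h2 : ∀ p ∈ d.items, (p.1, d.getD p.1 []) = p := by
    intro p hp
    have := PySem.Dict.getD_of_mem_items d (k := p.1) (v := p.2) (by simpa using hp) h []
    rw [this]
  exact (List.map_congr_left h2).symm ▸ (List.map_id d.items).symm ▸ rfl

def pvM (captured_pkt : List (Int × Int)) : List Int :=
  (PySem.Dict.ofList captured_pkt).values.filter (fun c => pvCid c != -1)

def pvS (captured_pkt : List (Int × Int)) : List (List Int) :=
  PySem.Set.ofList (pvRuns (pvM captured_pkt))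

def pvInit : PySem.Dict String (List (List Int)) := PySem.Dict.ofList
  [("Wait Connect", []), ("Wait Connect Rsp", []), ("Wait Send Config", []), ("Wait Config Req Rsp", []),
   ("Wait Create", []), ("Wait Create Rsp", []), ("Wait Move", []), ("Wait Move Rsp", []), ("Wait Disconnect", [])]

lemma catnames (c : Int) (nm : String) (h : pvCat c = some nm) : pvInit.contains nm = true := by
  unfold pvCat at h
  split_ifs at h <;> (cases h; decide)

lemma initkeys_nodup : pvInit.keys.Nodup := by decide

lemma initgetD (nm : String) : pvInit.getD nm [] = [] := by
  have hmk : pvInit = PySem.Dict.mk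
    [("Wait Connect", []), ("Wait Connect Rsp", []), ("Wait Send Config", []), ("Wait Config Req Rsp", []),
     ("Wait Create", []), ("Wait Create Rsp", []), ("Wait Move", []), ("Wait Move Rsp", []), ("Wait Disconnect", [])] := by decide
  rw [hmk, PySem.Dict.getD_eq_get?_getD]
  simp only [PySem.Dict.get?_mk_cons]
  split_ifs <;> rfl

lemma initkeys_list : pvInit.keys = ["Wait Connect", "Wait Connect Rsp", "Wait Send Config", "Wait Config Req Rsp",
    "Wait Create", "Wait Create Rsp", "Wait Move", "Wait Move Rsp", "Wait Disconnect"] := by decide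

-- pvRunsB computes pvRuns on lists of mapped codes
lemma takeWhile_congr_mem {α : Type} (p q : α → Bool) (l : List α) (h : ∀ x ∈ l, p x = q x) :
    l.takeWhile p = l.takeWhile q := by
  induction l with
  | nil => rfl
  | cons x xs ih =>
    rw [List.takeWhile_cons, List.takeWhile_cons, h x List.mem_cons_self,
      ih (fun y hy => h y (List.mem_cons_of_mem _ hy))]

lemma dropWhile_congr_mem {α : Type} (p q : α → Bool) (l : List α) (h : ∀ x ∈ l, p x = q x) :
    l.dropWhile p = l.dropWhile q := by
  induction l with
  | nil => rfl
  | cons x xs ih =>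
    rw [List.dropWhile_cons, List.dropWhile_cons, h x List.mem_cons_self,
      ih (fun y hy => h y (List.mem_cons_of_mem _ hy))]

lemma runsB_eq (m : List Int) (hm : ∀ c ∈ m, pvCid c ≠ -1) : pvRunsB m = pvRuns m := by
  induction hl : m.length using Nat.strong_induction_on generalizing m with
  | _ n ih =>
    cases m with
    | nil => simp [pvRunsB, pvRuns]
    | cons c rest =>
      have hc : pvCid c ≠ -1 := hm c List.mem_cons_self
      have hpred : ∀ x ∈ rest, ((PySem.Dict.ofList
          [((0x2:Int), (0:Int)), (0x3, 0), (0x4, 1), (0x5, 1), (0x6, 2), (0x7, 2), (0xC, 3), (0xD, 3), (0xE, 4), (0xF, 4), (0x10, 4), (0x11, 4)]).get? x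
            == (PySem.Dict.ofList
          [((0x2:Int), (0:Int)), (0x3, 0), (0x4, 1), (0x5, 1), (0x6, 2), (0x7, 2), (0xC, 3), (0xD, 3), (0xE, 4), (0xF, 4), (0x10, 4), (0x11, 4)]).get? c)
          = (pvCid x == pvCid c) := by
        intro x hx
        have hxc : pvCid x ≠ -1 := hm x (List.mem_cons_of_mem _ hx)
        rw [tblget, tblget, if_neg hxc, if_neg hc]
        by_cases h : pvCid x = pvCid c <;> simp [h]
      simp only [pvRunsB]
      rw [takeWhile_congr_mem _ _ rest hpred, dropWhile_congr_mem _ _ rest hpred,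
        pvRuns_cons_eq]
      subst hl
      congr 1
      exact ih (rest.dropWhile (fun x => pvCid x == pvCid c)).length
        (by simpa using Nat.lt_succ_of_le (List.length_dropWhile_le _ rest)) _
        (fun x hx => hm x (List.mem_cons_of_mem _ (List.dropWhile_sublist _ |>.mem hx))) rfl

-- first-occurrence dedup (Source B's fold) is PySem.Set.ofList, and it commutes with filter
lemma dedup_fold_eq_ofList (l : List (List Int)) :
    l.foldl (fun seen r => if seen.contains r then seen else seen ++ [r]) [] = PySem.Set.ofList l := by
  rw [PySem.Set.ofList_eq_foldl]
  rfl

lemma add_filter_pos (p : List Int → Bool) (acc : List (List Int)) (x : List Int) (hx : p x = true) :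
    (PySem.Set.add acc x).filter p = PySem.Set.add (acc.filter p) x := by
  simp only [PySem.Set.add, PySem.Set.contains]
  by_cases h : x ∈ acc
  · simp [h, List.mem_filter.mpr ⟨h, hx⟩]
  · have h2 : ¬ x ∈ acc.filter p := fun hc => h (List.mem_filter.mp hc).1
    simp [h, h2, List.filter_append, hx]

lemma add_filter_neg (p : List Int → Bool) (acc : List (List Int)) (x : List Int) (hx : p x = false) :
    (PySem.Set.add acc x).filter p = acc.filter p := by
  simp only [PySem.Set.add, PySem.Set.contains]
  by_cases h : x ∈ acc
  · simp [h]
  · simp [h, List.filter_append, hx]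

lemma foldl_add_filter (p : List Int → Bool) (l acc : List (List Int)) :
    (l.filter p).foldl PySem.Set.add (acc.filter p) = (l.foldl PySem.Set.add acc).filter p := by
  induction l generalizing acc with
  | nil => rfl
  | cons x xs ih =>
    rw [List.filter_cons, List.foldl_cons]
    by_cases hx : p x = true
    · rw [if_pos hx, List.foldl_cons, ← add_filter_pos p acc x hx, ih]
    · have hx' : p x = false := by simpa using hx
      rw [if_neg (by simp [hx']), ← add_filter_neg p acc x hx', ih]

lemma ofList_filter (p : List Int → Bool) (l : List (List Int)) :
    PySem.Set.ofList (l.filter p) = (PySem.Set.ofList l).filter p := by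
  rw [PySem.Set.ofList_eq_foldl, PySem.Set.ofList_eq_foldl]
  exact foldl_add_filter p l []

-- characterisations of the two ports
lemma B_char (cp : List (Int × Int)) :
    Reconstruct_StateM2_alt cp
    = pvInit.keys.map (fun nm => (nm, (pvS cp).filter (fun r => pvCat r.headI == some nm))) := by
  simp only [Reconstruct_StateM2_alt]
  rw [List.filter_congr (fun c _ => tblcontains c)]
  rw [show ((PySem.Dict.ofList cp).values.filter (fun c => pvCid c != -1)) = pvM cp from rfl]
  have hm : ∀ c ∈ pvM cp, pvCid c ≠ -1 := by
    intro c hc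
    have := (List.mem_filter.mp hc).2
    simpa using this
  rw [runsB_eq (pvM cp) hm, initkeys_list]
  apply List.map_congr_left
  intro nm _
  congr 1
  rw [List.filter_congr (fun (r : List Int) _ => by rw [namesget r.headI]),
    dedup_fold_eq_ofList, ofList_filter]
  rfl

lemma A_char (cp : List (Int × Int)) :
    Reconstruct_StateM2 cp
    = pvInit.keys.map (fun nm => (nm,
        ((PySem.Set.ofList ((pvS cp).map (fun r => r.headI))).filter (fun k => pvCat k == some nm)).flatMap
          (fun k => (pvS cp).filter (fun r => r.headI == k)))) := by
  simp only [Reconstruct_StateM2, classifyStateM]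
  have hstep : (fun (s : List (List Int) × List Int × Int) (pkt_info : Int × Int) =>
      if (PySem.Dict.ofList
          [((0x2:Int), (0:Int)), (0x3, 0), (0x4, 1), (0x5, 1), (0x6, 2), (0x7, 2), (0xC, 3), (0xD, 3), (0xE, 4), (0xF, 4), (0x10, 4), (0x11, 4)]).getD pkt_info.2 (-1) = -1 then s
      else if s.2.2 = -1 then (s.1, s.2.1 ++ [pkt_info.2], (PySem.Dict.ofList
          [((0x2:Int), (0:Int)), (0x3, 0), (0x4, 1), (0x5, 1), (0x6, 2), (0x7, 2), (0xC, 3), (0xD, 3), (0xE, 4), (0xF, 4), (0x10, 4), (0x11, 4)]).getD pkt_info.2 (-1))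
      else if s.2.2 = (PySem.Dict.ofList
          [((0x2:Int), (0:Int)), (0x3, 0), (0x4, 1), (0x5, 1), (0x6, 2), (0x7, 2), (0xC, 3), (0xD, 3), (0xE, 4), (0xF, 4), (0x10, 4), (0x11, 4)]).getD pkt_info.2 (-1) then (s.1, s.2.1 ++ [pkt_info.2], s.2.2)
      else (s.1 ++ [s.2.1], [pkt_info.2], (PySem.Dict.ofList
          [((0x2:Int), (0:Int)), (0x3, 0), (0x4, 1), (0x5, 1), (0x6, 2), (0x7, 2), (0xC, 3), (0xD, 3), (0xE, 4), (0xF, 4), (0x10, 4), (0x11, 4)]).getD pkt_info.2 (-1)))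
      = (fun s (pkt_info : Int × Int) =>
          if (fun c => pvCid c != -1) pkt_info.2 = true then pvStep s pkt_info.2 else s) := by
    funext s p
    rw [tblgetD1]
    by_cases h : pvCid p.2 = -1 <;> simp [pvStep, h]
  rw [hstep]
  have hfold : (PySem.Dict.ofList cp).items.foldl
      (fun s (pkt_info : Int × Int) => if (fun c => pvCid c != -1) pkt_info.2 = true then pvStep s pkt_info.2 else s)
      ([], [], -1)
      = (pvM cp).foldl pvStep ([], [], -1) := by
    have hv : ((PySem.Dict.ofList cp).items.map (fun p => p.2)).foldl
        (fun s c => if (fun c => pvCid c != -1) c = true then pvStep s c else s) ([], [], -1)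
        = (PySem.Dict.ofList cp).items.foldl
        (fun s (pkt_info : Int × Int) => if (fun c => pvCid c != -1) pkt_info.2 = true then pvStep s pkt_info.2 else s)
        ([], [], -1) := List.foldl_map
    rw [← hv, ← List.foldl_filter]
    rfl
  rw [hfold]
  have hm : ∀ c ∈ pvM cp, pvCid c ≠ -1 := by
    intro c hc
    have := (List.mem_filter.mp hc).2
    simpa using this
  have hflush : (if ((pvM cp).foldl pvStep ([], [], -1)).2.1 ≠ [] then
        ((pvM cp).foldl pvStep ([], [], -1)).1 ++ [((pvM cp).foldl pvStep ([], [], -1)).2.1]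
      else ((pvM cp).foldl pvStep ([], [], -1)).1) = pvRuns (pvM cp) := loop_main (pvM cp) hm
  rw [hflush]
  have hS : PySem.Set.ofList (pvRuns (pvM cp)) = pvS cp := rfl
  rw [hS]
  have hcl : (fun (d : PySem.Dict String (List (List Int))) (cluster_num : Int) =>
      if cluster_num ∈ ([0x02, 0x03] : List Int) then d.modify "Wait Connect" []
        (· ++ ((pvS cp).foldl (fun d cluster => d.modify cluster.headI [] (· ++ [cluster])) PySem.Dict.empty).getD cluster_num [])
      else if cluster_num = 0x04 then d.modify "Wait Send Config" []
        (· ++ ((pvS cp).foldl (fun d cluster => d.modify cluster.headI [] (· ++ [cluster])) PySem.Dict.empty).getD cluster_num [])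
      else if cluster_num = 0x05 then d.modify "Wait Config Req Rsp" []
        (· ++ ((pvS cp).foldl (fun d cluster => d.modify cluster.headI [] (· ++ [cluster])) PySem.Dict.empty).getD cluster_num [])
      else if cluster_num ∈ ([0x0C, 0x0D] : List Int) then d.modify "Wait Create" []
        (· ++ ((pvS cp).foldl (fun d cluster => d.modify cluster.headI [] (· ++ [cluster])) PySem.Dict.empty).getD cluster_num [])
      else if cluster_num ∈ ([0x0E, 0x0F] : List Int) then d.modify "Wait Move" []
        (· ++ ((pvS cp).foldl (fun d cluster => d.modify cluster.headI [] (· ++ [cluster])) PySem.Dict.empty).getD cluster_num [])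
      else if cluster_num ∈ ([0x06, 0x07] : List Int) then d.modify "Wait Disconnect" []
        (· ++ ((pvS cp).foldl (fun d cluster => d.modify cluster.headI [] (· ++ [cluster])) PySem.Dict.empty).getD cluster_num [])
      else d)
      = (fun (d : PySem.Dict String (List (List Int))) (k : Int) =>
          match pvCat k with
          | some nm => d.modify nm [] (· ++ ((pvS cp).filter (fun r => r.headI == k)))
          | none => d) := by
    funext d k
    have hg := stateMs_getD (pvS cp) k
    rw [hg]
    simp only [List.mem_cons, List.not_mem_nil, or_false]
    unfold pvCat
    split_ifs <;> rfl
  rw [hcl, stateMs_keys]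
  have hkeys : ((PySem.Set.ofList ((pvS cp).map (fun r => r.headI))).foldl
      (fun (d : PySem.Dict String (List (List Int))) (k : Int) =>
        match pvCat k with
        | some nm => d.modify nm [] (· ++ ((pvS cp).filter (fun r => r.headI == k)))
        | none => d) pvInit).keys = pvInit.keys :=
    keys_fold_app _ (fun k => pvCat k) (fun k => (pvS cp).filter (fun r => r.headI == k)) pvInit
      (fun k _ nm hnm => catnames k nm hnm)
  rw [show (PySem.Dict.ofList
    [("Wait Connect", []), ("Wait Connect Rsp", []), ("Wait Send Config", []), ("Wait Config Req Rsp", []),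
     ("Wait Create", []), ("Wait Create Rsp", []), ("Wait Move", []), ("Wait Move Rsp", []), ("Wait Disconnect", [])] :
      PySem.Dict String (List (List Int))) = pvInit from rfl]
  rw [items_eq_keys_map _ (by rw [hkeys]; exact initkeys_nodup), hkeys]
  apply List.map_congr_left
  intro nm _
  rw [getD_fold_app _ (fun k => pvCat k) (fun k => (pvS cp).filter (fun r => r.headI == k)) pvInit nm,
    initgetD]
  simp

-- ===== VERDICT (by name: the statement is the Claim_ definition above) =====
theorem Reconstruct_StateM2_spec : Claim_equal_Reconstruct_StateM2 := by
  unfold Claim_equal_Reconstruct_StateM2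
  intro cp _ hpre
  unfold Spec_Reconstruct_StateM2
  have hpre' : ((pvS cp).filterMap (fun r => pvCat r.headI)).Nodup := hpre
  rw [A_char, B_char]
  apply List.map_congr_left
  intro nm _
  exact congrArg (Prod.mk nm) (bucket_concat (pvS cp) nm (List.nodup_iff_count_le_one.mp hpre' nm))
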